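-- pv_equiv track=rewrite | github.com/kknd22/python-examples | no-three-consecutive-ab-recursive.py | solution
-- ===== SOURCE A (Python) =====
-- def solution(A, B):
--   ss = []
--   def rec (X, Y):
--     if ( abs(X-Y) < 2 ):
--       if ss and (ss[-1] == 'a'):
--         for _ in range(min(X,Y)):
--           ss.append('b')
--           ss.append('a')
--       else :
--         for _ in range(min(X,Y)):
--           ss.append('a')
--           ss.append('b')
--       if X > Y:
--         ss.append('a')
--       elif Y > X:
--         ss.append('b')
--     else:
--       if X > Y :
--         ss.append('a')
--         ss.append('a')
--         if (Y > 0):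
--           ss.append('b')
--           rec(X-2, Y-1)
--         else:
--           return
--       else:
--         ss.append('b')
--         ss.append('b')
--         if ( X > 0):
--           ss.append('a')
--           rec(X-1, Y-2)
--         else:
--           return
--
--   rec(A,B)
--   return ''.join(ss)
-- ===== SOURCE B (Python) =====
-- def solution(A, B):
--     out = []
--     X, Y = A, B
--     done = True
--     while abs(X - Y) >= 2:
--         if X > Y:
--             out.append('aa')
--             if Y <= 0:
--                 done = False
--                 break
--             out.append('b')
--             X -= 2
--             Y -= 1
--         else:
--             out.append('bb')
--             if X <= 0:
--                 done = False
--                 break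
--             out.append('a')
--             X -= 1
--             Y -= 2
--     if done:
--         pair = 'ba' if out and out[-1][-1] == 'a' else 'ab'
--         out.append(pair * min(X, Y))
--         if X > Y:
--             out.append('a')
--         elif Y > X:
--             out.append('b')
--     return ''.join(out)
-- ===== Notes on version B (the rewrite author's own statement) =====
-- stated objective: alternative
-- what changed: Replaced the inner recursive helper mutating a shared char list with an explicit while-loop over local counters that appends string chunks ('aa'/'b', 'bb'/'a') with a break flag, and builds the final alternating block by string multiplication instead of a per-character loop.
import Mathlib
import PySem

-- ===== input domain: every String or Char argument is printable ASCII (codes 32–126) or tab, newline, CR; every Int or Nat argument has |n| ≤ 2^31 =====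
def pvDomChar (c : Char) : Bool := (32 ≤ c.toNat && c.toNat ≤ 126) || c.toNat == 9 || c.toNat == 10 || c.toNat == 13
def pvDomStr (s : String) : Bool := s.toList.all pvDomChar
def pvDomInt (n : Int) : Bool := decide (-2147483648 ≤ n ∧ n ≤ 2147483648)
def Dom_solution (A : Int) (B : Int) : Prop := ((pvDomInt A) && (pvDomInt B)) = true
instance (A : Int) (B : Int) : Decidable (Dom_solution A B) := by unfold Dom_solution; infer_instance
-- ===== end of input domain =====

-- B replaces A's inner recursive helper mutating a shared char list by an explicit
-- while-loop over the two counters appending string chunks with a break flag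
-- (objective: alternative decomposition; same cost).

-- ===== PORT A =====
-- A's inner `rec(X, Y)` mutating the shared list ss; ss is threaded through, and the
-- recursion is made total with a fuel counter (|X-Y| drops by 1 per recursive call,
-- so fuel = |A-B|+1 is never exhausted; fuel is only a totality device).
def solutionRec (fuel : Nat) (X : Int) (Y : Int) (ss : List Char) : List Char :=
  match fuel with
  | 0 => ss
  | fuel + 1 =>
    if (X - Y).natAbs < 2 then
      let ss1 :=
        if ss.getLast? = some 'a' then
          ss ++ (List.replicate (min X Y).toNat ['b', 'a']).flatten
        else
          ss ++ (List.replicate (min X Y).toNat ['a', 'b']).flatten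
      if X > Y then ss1 ++ ['a']
      else if Y > X then ss1 ++ ['b']
      else ss1
    else
      if X > Y then
        if Y > 0 then solutionRec fuel (X - 2) (Y - 1) (ss ++ ['a', 'a', 'b'])
        else ss ++ ['a', 'a']
      else
        if X > 0 then solutionRec fuel (X - 1) (Y - 2) (ss ++ ['b', 'b', 'a'])
        else ss ++ ['b', 'b']

def solution (A : Int) (B : Int) : String :=
  String.mk (solutionRec ((A - B).natAbs + 1) A B [])

-- ===== PORT B =====
-- the while-loop of Source B; returns (out, X, Y, done) as left after the loop; same fuel
-- totality device (|X-Y| drops by 1 per iteration; fuel 0 is never reached from solution_alt)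
def solutionAltLoop (fuel : Nat) (X : Int) (Y : Int) (out : List (List Char)) :
    List (List Char) × Int × Int × Bool :=
  match fuel with
  | 0 => (out, X, Y, false)
  | fuel + 1 =>
    if 2 ≤ (X - Y).natAbs then
      if X > Y then
        if Y ≤ 0 then (out ++ [['a', 'a']], X, Y, false)
        else solutionAltLoop fuel (X - 2) (Y - 1) (out ++ [['a', 'a'], ['b']])
      else
        if X ≤ 0 then (out ++ [['b', 'b']], X, Y, false)
        else solutionAltLoop fuel (X - 1) (Y - 2) (out ++ [['b', 'b'], ['a']])
    else (out, X, Y, true)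

-- the `if done:` block plus final ''.join(out)
def solutionAltFinish (r : List (List Char) × Int × Int × Bool) : List Char :=
  match r with
  | (out, X, Y, done) =>
    let out1 :=
      if done then
        let pair := if out.getLast?.bind List.getLast? = some 'a' then ['b', 'a'] else ['a', 'b']
        let out2 := out ++ [(List.replicate (min X Y).toNat pair).flatten]
        if X > Y then out2 ++ [['a']]
        else if Y > X then out2 ++ [['b']]
        else out2
      else out
    out1.flatten

def solution_alt (A : Int) (B : Int) : String :=
  String.mk (solutionAltFinish (solutionAltLoop ((A - B).natAbs + 1) A B []))

-- ===== PRECONDITION & SPEC =====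
-- Pre_ excludes exactly the deep-recursion inputs on which CPython raises RecursionError in A
-- (`rec` nests max 0 (min (|A-B|-1) (min A B)) calls; with the default recursion limit of 1000
-- the measured crash onset is 995 nested calls with an empty caller stack and 945 under a
-- 50-frame caller, so the bound sits at the lower edge of that onset band). The equivalence
-- proof below does not use Pre_: the ports agree on ALL inputs; Pre_ only reflects A's crash.
def Pre_solution (A : Int) (B : Int) : Prop :=
  max 0 (min ((A - B).natAbs - 1 : Int) (min A B)) ≤ 944
instance (A : Int) (B : Int) : Decidable (Pre_solution A B) := by unfold Pre_solution; infer_instance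
def pvWitness_solution : Int × Int := (3, 5)

def Spec_solution (A : Int) (B : Int) (out : String) : Prop := out = solution_alt A B
instance (A : Int) (B : Int) (out : String) : Decidable (Spec_solution A B out) := by unfold Spec_solution; infer_instance

-- ===== CLAIM (what is proved, stated in full; the proofs are below) =====
def Claim_equal_solution : Prop := ∀ (A : Int) (B : Int), Dom_solution A B → Pre_solution A B → Spec_solution A B (solution A B)

-- ===== LEMMAS AND PROOFS =====

theorem flatten_getLast?_of_nonnil (out : List (List Char)) (h : [] ∉ out) :
    out.flatten.getLast? = out.getLast?.bind List.getLast? := by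
  induction out using List.reverseRecOn with
  | nil => simp
  | append_singleton xs a _ =>
    have ha : a ≠ [] := fun he => h (by simp [he])
    obtain ⟨v, hv⟩ := Option.isSome_iff_exists.mp (List.getLast?_isSome.mpr ha)
    simp [List.getLast?_append, hv]

theorem solutionRec_eq_alt (fuel : Nat) (X : Int) (Y : Int) (out : List (List Char))
    (h : [] ∉ out) :
    solutionRec fuel X Y out.flatten = solutionAltFinish (solutionAltLoop fuel X Y out) := by
  induction fuel generalizing X Y out with
  | zero => simp [solutionRec, solutionAltLoop, solutionAltFinish]
  | succ fuel ih =>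
    rw [solutionRec, solutionAltLoop]
    by_cases hge : 2 ≤ (X - Y).natAbs
    · by_cases hXY : X > Y
      · by_cases hY0 : Y ≤ 0
        · simp [show ¬ (X - Y).natAbs < 2 by omega, hge, hXY, hY0, show ¬ 0 < Y by omega,
            solutionAltFinish]
        · have h' : [] ∉ out ++ [['a', 'a'], ['b']] := by
            intro hm; rcases List.mem_append.mp hm with hm | hm
            · exact h hm
            · simp at hm
          have key := ih (X - 2) (Y - 1) _ h'
          simp only [List.flatten_append, List.flatten_cons, List.flatten_nil,
            List.append_nil] at key
          simp [show ¬ (X - Y).natAbs < 2 by omega, hge, hXY, hY0, show 0 < Y by omega]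
          simpa using key
      · by_cases hX0 : X ≤ 0
        · simp [show ¬ (X - Y).natAbs < 2 by omega, hge, hXY, hX0, show ¬ 0 < X by omega,
            solutionAltFinish]
        · have h' : [] ∉ out ++ [['b', 'b'], ['a']] := by
            intro hm; rcases List.mem_append.mp hm with hm | hm
            · exact h hm
            · simp at hm
          have key := ih (X - 1) (Y - 2) _ h'
          simp only [List.flatten_append, List.flatten_cons, List.flatten_nil,
            List.append_nil] at key
          simp [show ¬ (X - Y).natAbs < 2 by omega, hge, hXY, hX0, show 0 < X by omega]
          simpa using key
    · have h2 : (X - Y).natAbs < 2 := by omega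
      have hlast := flatten_getLast?_of_nonnil out h
      simp only [if_pos h2, if_neg hge, solutionAltFinish, ← hlast]
      by_cases ha : out.flatten.getLast? = some 'a' <;>
        simp [ha] <;> split_ifs <;> simp

theorem solution_spec' (A : Int) (B : Int) : solution A B = solution_alt A B := by
  unfold solution solution_alt
  exact congrArg String.mk (solutionRec_eq_alt ((A - B).natAbs + 1) A B [] (by simp))

-- ===== VERDICT (by name: the statement is the Claim_ definition above) =====
theorem solution_spec : Claim_equal_solution := by
  intro A B _ _
  unfold Spec_solution
  exact solution_spec' A B
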